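-- pv_equiv track=rewrite | github.com/FahriBilgen/networkCRM | fortress_director/orchestrator/safe_function_executor.py | _normalize_safe_function_kwargs
-- ===== SOURCE A (Python) =====
-- from typing import Any, Dict, List, Optional, Set, Tuple
--
-- def _normalize_safe_function_kwargs(
--     name: str,
--     args: List[Any],
--     kwargs: Dict[str, Any],
-- ) -> Dict[str, Any]:
--     def _as_text(value: Any) -> str:
--         text = str(value) if value is not None else ""
--         return text.strip()
--
--     if name == "change_weather":
--         atmosphere = kwargs.get("atmosphere")
--         details = kwargs.get("sensory_details")
--         if args:
--             atmosphere = args[0]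
--             if len(args) > 1:
--                 details = args[1]
--         atmosphere_text = _as_text(atmosphere)
--         if not atmosphere_text:
--             raise ValueError("change_weather requires an atmosphere")
--         details_text = _as_text(details) or "The weather shifts subtly."
--         return {
--             "atmosphere": atmosphere_text,
--             "sensory_details": details_text,
--         }
--
--     if name == "spawn_item":
--         item_id = kwargs.get("item_id")
--         target = kwargs.get("target")
--         if args:
--             if len(args) > 0:
--                 item_id = args[0]
--             if len(args) > 1:
--                 target = args[1]
--         item_text = _as_text(item_id)
--         target_text = _as_text(target)
--         if not item_text or not target_text:
--             raise ValueError("spawn_item requires item_id and target")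
--         return {
--             "item_id": item_text,
--             "target": target_text,
--         }
--
--     if name == "move_npc":
--         npc_id = kwargs.get("npc_id") or kwargs.get("npc_name")
--         location = kwargs.get("location") or kwargs.get("target")
--         if args:
--             if len(args) > 0:
--                 npc_id = args[0]
--             if len(args) > 1:
--                 location = args[1]
--         npc_text = _as_text(npc_id)
--         location_text = _as_text(location)
--         if not npc_text or not location_text:
--             raise ValueError("move_npc requires npc identifier and location")
--         return {
--             "npc_id": npc_text,
--             "location": location_text,
--         }
--
--     cleaned = {
--         key: value for key, value in kwargs.items() if key and value is not None
--     }
--     return cleaned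
-- ===== SOURCE B (Python) =====
-- # B: one generic spec-table normalizer replacing the three copy-pasted branches.
-- _SAFE_FUNCTION_SPECS = {
--     "change_weather": (
--         "change_weather requires an atmosphere",
--         [
--             ("atmosphere", ("atmosphere",), None),
--             ("sensory_details", ("sensory_details",), "The weather shifts subtly."),
--         ],
--     ),
--     "spawn_item": (
--         "spawn_item requires item_id and target",
--         [
--             ("item_id", ("item_id",), None),
--             ("target", ("target",), None),
--         ],
--     ),
--     "move_npc": (
--         "move_npc requires npc identifier and location",
--         [
--             ("npc_id", ("npc_id", "npc_name"), None),
--             ("location", ("location", "target"), None),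
--         ],
--     ),
-- }
--
--
-- def _normalize_safe_function_kwargs(name, args, kwargs):
--     spec = _SAFE_FUNCTION_SPECS.get(name)
--     if spec is None:
--         return {key: value for key, value in kwargs.items() if key and value is not None}
--     message, fields = spec
--     out = {}
--     for pos, (field, sources, default) in enumerate(fields):
--         if pos < len(args):
--             value = args[pos]
--         else:
--             value = next((kwargs[s] for s in sources if kwargs.get(s)), None)
--         text = str(value).strip() if value is not None else ""
--         if not text:
--             if default is None:
--                 raise ValueError(message)
--             text = default
--         out[field] = text
--     return out
-- ===== Notes on version B (the rewrite author's own statement) =====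
-- stated objective: simpler
-- what changed: Replaces the three copy-pasted per-function branches by a declarative spec table (field, ordered source keys, optional default) and one generic field-resolution loop; unknown names keep the same cleanup comprehension.
import Mathlib
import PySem

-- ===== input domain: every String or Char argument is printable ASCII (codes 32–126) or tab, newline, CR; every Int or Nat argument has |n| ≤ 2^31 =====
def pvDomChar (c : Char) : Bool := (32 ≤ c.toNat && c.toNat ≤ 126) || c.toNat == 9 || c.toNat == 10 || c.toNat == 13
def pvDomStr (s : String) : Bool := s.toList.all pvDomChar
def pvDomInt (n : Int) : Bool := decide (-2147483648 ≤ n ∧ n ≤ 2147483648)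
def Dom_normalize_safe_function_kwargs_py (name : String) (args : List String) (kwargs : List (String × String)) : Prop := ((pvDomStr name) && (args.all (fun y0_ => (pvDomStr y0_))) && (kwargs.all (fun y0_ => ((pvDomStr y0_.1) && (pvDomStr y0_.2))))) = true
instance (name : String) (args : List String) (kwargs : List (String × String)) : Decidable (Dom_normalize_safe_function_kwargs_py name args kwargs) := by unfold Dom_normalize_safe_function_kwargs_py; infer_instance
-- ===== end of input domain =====

-- B replaces A's three copy-pasted per-function branches by one generic normalizer driven by a
-- spec table (field, source keys, optional default); equivalence of RETURN values on Pre_ (A's non-raising inputs).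

-- ===== PORT A =====
-- _as_text(value): "" for None, else str(value).strip()  (values are strings on this domain)
def pvAsText (v : Option String) : String := PySem.Str.strip (v.getD "")

def normalize_safe_function_kwargs_py (name : String) (args : List String) (kwargs : List (String × String)) : List (String × String) :=
  if name = "change_weather" then
    let atmosphere := kwargs.lookup "atmosphere"
    let details := kwargs.lookup "sensory_details"
    let atmosphere := if args ≠ [] then PySem.List.pyGet? args 0 else atmosphere
    let details := if args ≠ [] then (if args.length > 1 then PySem.List.pyGet? args 1 else details) else details
    let atmosphere_text := pvAsText atmosphere
    if atmosphere_text = "" then []  -- raise ValueError("change_weather requires an atmosphere"): excluded by Pre_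
    else
      let details_text := if pvAsText details = "" then "The weather shifts subtly." else pvAsText details
      [("atmosphere", atmosphere_text), ("sensory_details", details_text)]
  else if name = "spawn_item" then
    let item_id := kwargs.lookup "item_id"
    let target := kwargs.lookup "target"
    let item_id := if args ≠ [] then (if args.length > 0 then PySem.List.pyGet? args 0 else item_id) else item_id
    let target := if args ≠ [] then (if args.length > 1 then PySem.List.pyGet? args 1 else target) else target
    let item_text := pvAsText item_id
    let target_text := pvAsText target
    if item_text = "" ∨ target_text = "" then []  -- raise ValueError("spawn_item requires item_id and target"): excluded by Pre_
    else [("item_id", item_text), ("target", target_text)]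
  else if name = "move_npc" then
    -- kwargs.get("npc_id") or kwargs.get("npc_name"): falsy ("" or missing) falls through
    let npc_id := match kwargs.lookup "npc_id" with
      | some v => if v ≠ "" then some v else kwargs.lookup "npc_name"
      | none => kwargs.lookup "npc_name"
    let location := match kwargs.lookup "location" with
      | some v => if v ≠ "" then some v else kwargs.lookup "target"
      | none => kwargs.lookup "target"
    let npc_id := if args ≠ [] then (if args.length > 0 then PySem.List.pyGet? args 0 else npc_id) else npc_id
    let location := if args ≠ [] then (if args.length > 1 then PySem.List.pyGet? args 1 else location) else location
    let npc_text := pvAsText npc_id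
    let location_text := pvAsText location
    if npc_text = "" ∨ location_text = "" then []  -- raise ValueError("move_npc requires npc identifier and location"): excluded by Pre_
    else [("npc_id", npc_text), ("location", location_text)]
  else
    kwargs.filter (fun kv => kv.1 ≠ "")  -- {k: v for k, v in kwargs.items() if k and v is not None}; v is a string, never None

-- ===== PORT B =====
-- the spec table: name ↦ (error message, [(field, source keys, optional default)])
def pvSpecs : List (String × (String × List (String × List String × Option String))) :=
  [("change_weather", ("change_weather requires an atmosphere",
      [("atmosphere", ["atmosphere"], none),
       ("sensory_details", ["sensory_details"], some "The weather shifts subtly.")])),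
   ("spawn_item", ("spawn_item requires item_id and target",
      [("item_id", ["item_id"], none),
       ("target", ["target"], none)])),
   ("move_npc", ("move_npc requires npc identifier and location",
      [("npc_id", ["npc_id", "npc_name"], none),
       ("location", ["location", "target"], none)]))]

-- next((kwargs[s] for s in sources if kwargs.get(s)), None)
def pvFirstTruthy (kwargs : List (String × String)) : List String → Option String
  | [] => none
  | s :: rest => match kwargs.lookup s with
      | some v => if v ≠ "" then some v else pvFirstTruthy kwargs rest
      | none => pvFirstTruthy kwargs rest

-- str(value).strip() if value is not None else ""
def pvTextOf (v : Option String) : String :=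
  match v with | some s => PySem.Str.strip s | none => ""

-- the field loop; none = ValueError(message)
def pvBuildFields (args : List String) (kwargs : List (String × String)) :
    Nat → List (String × List String × Option String) → Option (List (String × String))
  | _, [] => some []
  | pos, (field, sources, default) :: rest =>
    let value := if pos < args.length then PySem.List.pyGet? args pos else pvFirstTruthy kwargs sources
    let text := pvTextOf value
    if text = "" then
      match default with
      | none => none
      | some d => (pvBuildFields args kwargs (pos + 1) rest).map ((field, d) :: ·)
    else (pvBuildFields args kwargs (pos + 1) rest).map ((field, text) :: ·)

def normalize_safe_function_kwargs_py_alt (name : String) (args : List String) (kwargs : List (String × String)) : List (String × String) :=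
  match pvSpecs.lookup name with
  | none => kwargs.filter (fun kv => kv.1 ≠ "")
  | some (_message, fields) => (pvBuildFields args kwargs 0 fields).getD []  -- getD unreachable under Pre_

-- ===== PRECONDITION & SPEC =====
-- the stripped effective text of a field: the positional argument if present, else the first
-- non-empty value among the source keys (Python truthiness); "" means the field is missing
-- first non-empty among a list of optional values (Python `or`-style truthiness)
def pvComb (o acc : Option String) : Option String :=
  match o with | some v => if v = "" then acc else some v | none => acc

def pvSrcText (args : List String) (kwargs : List (String × String)) (pos : Nat) (keys : List String) : String :=
  PySem.Str.strip
    ((if pos < args.length then PySem.List.pyGet? args pos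
      else (keys.map (kwargs.lookup ·)).foldr pvComb none).getD "")

-- Pre_ excludes exactly the inputs where A raises ValueError: a required field of one of the
-- three known names whose effective value strips to "".
def Pre_normalize_safe_function_kwargs_py (name : String) (args : List String) (kwargs : List (String × String)) : Prop :=
  (name = "change_weather" → pvSrcText args kwargs 0 ["atmosphere"] ≠ "")
  ∧ (name = "spawn_item" → pvSrcText args kwargs 0 ["item_id"] ≠ "" ∧ pvSrcText args kwargs 1 ["target"] ≠ "")
  ∧ (name = "move_npc" → pvSrcText args kwargs 0 ["npc_id", "npc_name"] ≠ "" ∧ pvSrcText args kwargs 1 ["location", "target"] ≠ "")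
instance (name : String) (args : List String) (kwargs : List (String × String)) : Decidable (Pre_normalize_safe_function_kwargs_py name args kwargs) := by unfold Pre_normalize_safe_function_kwargs_py; infer_instance

def pvWitness_normalize_safe_function_kwargs_py : String × List String × (List (String × String)) :=
  ("move_npc", ["guard"], [("location", "gate")])

def Spec_normalize_safe_function_kwargs_py (name : String) (args : List String) (kwargs : List (String × String)) (out : List (String × String)) : Prop := out = normalize_safe_function_kwargs_py_alt name args kwargs
instance (name : String) (args : List String) (kwargs : List (String × String)) (out : List (String × String)) : Decidable (Spec_normalize_safe_function_kwargs_py name args kwargs out) := by unfold Spec_normalize_safe_function_kwargs_py; infer_instance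

-- ===== CLAIM (what is proved, stated in full; the proofs are below) =====
def Claim_equal_normalize_safe_function_kwargs_py : Prop := ∀ (name : String) (args : List String) (kwargs : List (String × String)), Dom_normalize_safe_function_kwargs_py name args kwargs → Pre_normalize_safe_function_kwargs_py name args kwargs → Spec_normalize_safe_function_kwargs_py name args kwargs (normalize_safe_function_kwargs_py name args kwargs)

-- ===== LEMMAS AND PROOFS =====

lemma pvStrip_empty : PySem.Str.strip "" = "" := by decide

lemma pvTextOf_eq (o : Option String) : pvTextOf o = pvAsText o := by
  cases o <;> simp [pvTextOf, pvAsText, pvStrip_empty]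

lemma pvComb_one (o : Option String) : pvAsText (pvComb o none) = pvAsText o := by
  cases o with
  | none => rfl
  | some v =>
    by_cases h : v = "" <;> simp [pvComb, pvAsText, h, pvStrip_empty]

lemma pvComb_two (o1 o2 : Option String) :
    pvAsText (pvComb o1 (pvComb o2 none)) =
      pvAsText (match o1 with | some v => if v ≠ "" then some v else o2 | none => o2) := by
  cases o1 with
  | none => simpa using pvComb_one o2
  | some v =>
    by_cases h : v = ""
    · simpa [pvComb, h] using pvComb_one o2
    · simp [pvComb, h]

lemma pvFirstTruthy_text (kwargs : List (String × String)) (keys : List String) :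
    pvTextOf (pvFirstTruthy kwargs keys) =
      pvAsText ((keys.map (kwargs.lookup ·)).foldr pvComb none) := by
  induction keys with
  | nil => simp [pvFirstTruthy, pvTextOf, pvAsText, pvStrip_empty]
  | cons s rest ih =>
    simp only [pvFirstTruthy, List.map_cons, List.foldr_cons]
    cases h : kwargs.lookup s with
    | none => simpa [pvComb] using ih
    | some v =>
      by_cases hv : v = ""
      · simpa [pvComb, hv] using ih
      · simp [pvComb, hv, pvTextOf, pvAsText]

lemma pvFT_one (kwargs : List (String × String)) (k : String) :
    pvAsText (pvFirstTruthy kwargs [k]) = pvAsText (kwargs.lookup k) := by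
  rw [← pvTextOf_eq, pvFirstTruthy_text]
  simpa using pvComb_one (kwargs.lookup k)

lemma pvFT_two (kwargs : List (String × String)) (k1 k2 : String) :
    pvAsText (pvFirstTruthy kwargs [k1, k2]) =
      pvAsText (match kwargs.lookup k1 with
        | some v => if v ≠ "" then some v else kwargs.lookup k2
        | none => kwargs.lookup k2) := by
  rw [← pvTextOf_eq, pvFirstTruthy_text]
  simpa using pvComb_two (kwargs.lookup k1) (kwargs.lookup k2)

-- B's field text in the common shape

lemma pvSrc_common (args : List String) (kwargs : List (String × String)) (pos : Nat)
    (keys : List String) (o : Option String)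
    (h : pvAsText (pvFirstTruthy kwargs keys) = pvAsText o) :
    pvSrcText args kwargs pos keys =
      pvAsText (if pos < args.length then PySem.List.pyGet? args pos else o) := by
  unfold pvSrcText
  by_cases hp : pos < args.length
  · simp [hp, pvAsText]
  · simp only [hp, if_false]
    exact ((pvTextOf_eq _).symm.trans (pvFirstTruthy_text kwargs keys)).symm.trans h

-- A's positional-override shapes in the common shape
lemma pvAsText_some (v : String) : pvAsText (some v) = PySem.Str.strip v := rfl


lemma pvGet1 {x y : String} (l : List String) : PySem.List.pyGet? (x :: y :: l) 1 = some y := by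
  simp [PySem.List.pyGet?, PySem.List.pyIdx?]


theorem normalize_safe_function_kwargs_py_spec : Claim_equal_normalize_safe_function_kwargs_py := by
  intro name args kwargs _hdom hpre
  obtain ⟨h1, h2, h3⟩ := hpre
  unfold Spec_normalize_safe_function_kwargs_py
  by_cases hn1 : name = "change_weather"
  · subst hn1
    have hA := h1 rfl
    rw [pvSrc_common args kwargs 0 _ _ (pvFT_one kwargs "atmosphere")] at hA
    rcases args with _ | ⟨a0, _ | ⟨a1, rest⟩⟩ <;>
      simp [pvAsText_some, Nat.cast_zero, PySem.List.pyGet?_zero_cons] at hA <;>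
      simp [normalize_safe_function_kwargs_py, normalize_safe_function_kwargs_py_alt,
        pvSpecs, pvBuildFields, List.lookup, pvTextOf_eq, pvFT_one, pvFT_two, pvGet1,
        pvAsText_some, PySem.List.pyGet?_zero_cons, Nat.cast_one, Nat.cast_zero, hA] <;>
      split_ifs <;> simp_all [pvFT_one, pvFT_two, pvAsText_some]
  · by_cases hn2 : name = "spawn_item"
    · subst hn2
      obtain ⟨hA, hB⟩ := h2 rfl
      rw [pvSrc_common args kwargs 0 _ _ (pvFT_one kwargs "item_id")] at hA
      rw [pvSrc_common args kwargs 1 _ _ (pvFT_one kwargs "target")] at hB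
      rcases args with _ | ⟨a0, _ | ⟨a1, rest⟩⟩ <;>
        simp [pvAsText_some, PySem.List.pyGet?_zero_cons, pvGet1, Nat.cast_one] at hA hB <;>
        simp [normalize_safe_function_kwargs_py, normalize_safe_function_kwargs_py_alt,
          pvSpecs, pvBuildFields, List.lookup, pvTextOf_eq, pvFT_one, pvGet1,
          pvAsText_some, PySem.List.pyGet?_zero_cons, Nat.cast_one, Nat.cast_zero, hA, hB]
    · by_cases hn3 : name = "move_npc"
      · subst hn3
        obtain ⟨hA, hB⟩ := h3 rfl
        rw [pvSrc_common args kwargs 0 _ _ (pvFT_two kwargs "npc_id" "npc_name")] at hA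
        rw [pvSrc_common args kwargs 1 _ _ (pvFT_two kwargs "location" "target")] at hB
        rcases args with _ | ⟨a0, _ | ⟨a1, rest⟩⟩ <;>
          simp [pvAsText_some, PySem.List.pyGet?_zero_cons, pvGet1, Nat.cast_one] at hA hB <;>
          simp [normalize_safe_function_kwargs_py, normalize_safe_function_kwargs_py_alt,
            pvSpecs, pvBuildFields, List.lookup, pvTextOf_eq, pvFT_two, pvGet1,
            pvAsText_some, PySem.List.pyGet?_zero_cons, Nat.cast_one, Nat.cast_zero, hn1, hn2, hA, hB]
      · have b1 : (name == "change_weather") = false := by simp [hn1]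
        have b2 : (name == "spawn_item") = false := by simp [hn2]
        have b3 : (name == "move_npc") = false := by simp [hn3]
        simp [normalize_safe_function_kwargs_py, normalize_safe_function_kwargs_py_alt,
          pvSpecs, List.lookup, hn1, hn2, hn3, b1, b2, b3]
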